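-- pv_equiv track=rewrite | github.com/bradipao/fork_guorbit-ccsds-122.0-b-2 | src/bpe_dc.py | _gaggle_sizes
-- ===== SOURCE A (Python) =====
-- from typing import List, Tuple, Literal, Optional
--
-- def _gaggle_sizes(S: int) -> List[int]:
--     # first gaggle: 15 mapped deltas (because c'0 sent as reference), subsequent: 16, last may be shorter (§4.3.2.5)
--     if S == 0:
--         return []
--     if S == 1:
--         return [0]  # only reference sample
--     rem = S - 1
--     sizes = [min(15, rem)]
--     rem -= sizes[0]
--     while rem > 0:
--         take = min(16, rem)
--         sizes.append(take)
--         rem -= take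
--     return sizes
-- ===== SOURCE B (Python) =====
-- from typing import List
--
-- def _gaggle_sizes(S: int) -> List[int]:
--     if S == 0:
--         return []
--     rem = S - 1
--     first = min(15, rem)
--     rest = rem - first
--     sizes = [first] + [16] * (rest // 16)
--     if rest % 16:
--         sizes.append(rest % 16)
--     return sizes
-- ===== Notes on version B (the rewrite author's own statement) =====
-- stated objective: simpler
-- what changed: Replaces the incremental subtraction while-loop with closed-form division/modulo arithmetic ([first] + [16]*(rest//16) plus the nonzero remainder), so the single-sample special case falls out of the formula.
import Mathlib
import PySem

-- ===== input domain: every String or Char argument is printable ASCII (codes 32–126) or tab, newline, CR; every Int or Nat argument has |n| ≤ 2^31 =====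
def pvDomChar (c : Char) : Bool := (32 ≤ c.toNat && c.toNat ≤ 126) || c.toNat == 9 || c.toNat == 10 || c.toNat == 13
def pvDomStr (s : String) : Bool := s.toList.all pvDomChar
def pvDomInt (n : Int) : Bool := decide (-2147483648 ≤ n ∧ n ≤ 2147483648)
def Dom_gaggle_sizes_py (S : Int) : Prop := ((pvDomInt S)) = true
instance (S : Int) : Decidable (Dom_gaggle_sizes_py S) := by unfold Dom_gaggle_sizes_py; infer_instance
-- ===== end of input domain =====

-- B replaces A's subtraction while-loop with closed-form division/modulo arithmetic (objective: simpler).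


-- ===== PORT A =====
-- the 'while rem > 0' loop of A, carrying the accumulated sizes list
def gaggleLoopA (sizes : List Int) (rem : Int) : List Int :=
  if _h : rem > 0 then
    let take := min 16 rem
    gaggleLoopA (sizes ++ [take]) (rem - take)
  else sizes
termination_by rem.toNat
decreasing_by omega

def gaggle_sizes_py (S : Int) : List Int :=
  if S = 0 then []
  else if S = 1 then [0]
  else
    let rem := S - 1
    let sizes := [min 15 rem]
    let rem := rem - (min 15 rem)
    gaggleLoopA sizes rem

-- ===== PORT B =====
def gaggle_sizes_py_alt (S : Int) : List Int :=
  if S = 0 then []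
  else
    let rem := S - 1
    let first := min 15 rem
    let rest := rem - first
    let sizes := [first] ++ List.replicate (PySem.Int.floordiv rest 16).toNat 16
    if PySem.Int.mod rest 16 ≠ 0 then sizes ++ [PySem.Int.mod rest 16] else sizes

-- ===== PRECONDITION & SPEC =====
def Spec_gaggle_sizes_py (S : Int) (out : List Int) : Prop := out = gaggle_sizes_py_alt S
instance (S : Int) (out : List Int) : Decidable (Spec_gaggle_sizes_py S out) := by unfold Spec_gaggle_sizes_py; infer_instance

-- ===== CLAIM (what is proved, stated in full; the proofs are below) =====
def Claim_equal_gaggle_sizes_py : Prop := ∀ (S : Int), Dom_gaggle_sizes_py S → Spec_gaggle_sizes_py S (gaggle_sizes_py S)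

-- ===== LEMMAS AND PROOFS =====

-- closed-form characterisation of A's while-loop for a nonnegative remainder
theorem gaggleLoopA_spec (n : Nat) (sizes : List Int) :
    gaggleLoopA sizes (n : Int) =
      sizes ++ List.replicate (n / 16) 16 ++ (if n % 16 ≠ 0 then [((n % 16 : Nat) : Int)] else []) := by
  induction n using Nat.strong_induction_on generalizing sizes with
  | _ n ih =>
    rw [gaggleLoopA.eq_1]
    by_cases h0 : n = 0
    · subst h0; simp
    · have hpos : (0:Int) < (n:Int) := by exact_mod_cast Nat.pos_of_ne_zero h0
      rw [dif_pos hpos]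
      dsimp only
      by_cases h16 : n ≤ 16
      · have hmin : min (16:Int) (n:Int) = (n:Int) := by omega
        rw [hmin, sub_self, gaggleLoopA.eq_1, dif_neg (lt_irrefl 0)]
        by_cases h : n = 16
        · subst h; norm_num
        · have hd : n / 16 = 0 := by omega
          have hm : n % 16 = n := by omega
          simp [hd, hm, h0]
      · have hmin : min (16:Int) (n:Int) = (16:Int) := by omega
        rw [hmin]
        have hc : (n:Int) - 16 = ((n - 16 : Nat) : Int) := by omega
        rw [hc, ih (n - 16) (by omega)]
        have hd : n / 16 = (n - 16) / 16 + 1 := by omega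
        have hm : n % 16 = (n - 16) % 16 := by omega
        rw [hd, hm, List.replicate_succ]
        simp

-- ===== VERDICT (by name: the statement is the Claim_ definition above) =====
theorem gaggle_sizes_py_spec : Claim_equal_gaggle_sizes_py := by
  unfold Claim_equal_gaggle_sizes_py
  intro S _
  unfold Spec_gaggle_sizes_py gaggle_sizes_py gaggle_sizes_py_alt
  by_cases h0 : S = 0
  · simp [h0]
  · by_cases h1 : S = 1
    · subst h1; norm_num [PySem.Int.floordiv, PySem.Int.mod]
    · simp only [if_neg h0, if_neg h1]
      obtain ⟨n, hn⟩ : ∃ n : Nat, S - 1 - min 15 (S - 1) = (n:Int) :=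
        ⟨(S - 1 - min 15 (S - 1)).toNat, by omega⟩
      rw [hn, gaggleLoopA_spec]
      have hfd : PySem.Int.floordiv (n:Int) 16 = ((n/16 : Nat) : Int) := by
        rw [PySem.Int.floordiv_eq_ediv_of_pos (by norm_num)]; omega
      have hmd : PySem.Int.mod (n:Int) 16 = ((n % 16 : Nat) : Int) := by
        rw [PySem.Int.mod_eq_emod_of_pos (by norm_num)]; omega
      rw [hfd, hmd]
      have ht : (((n/16 : Nat) : Int)).toNat = n / 16 := by omega
      rw [ht]
      by_cases hz : n % 16 = 0
      · simp [hz]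
      · simp [hz]
        omega
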